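-- pv_equiv track=rewrite | github.com/bahamouldi/beehivev6.0 | waf/api_discovery.py | _calculate_depth
-- ===== SOURCE A (Python) =====
-- def _calculate_depth(query: str) -> int:
--     """Calculate nesting depth of a GraphQL query."""
--     max_depth = 0
--     current = 0
--     for char in query:
--         if char == '{':
--             current += 1
--             max_depth = max(max_depth, current)
--         elif char == '}':
--             current -= 1
--     return max_depth
-- ===== SOURCE B (Python) =====
-- def _calculate_depth(query: str) -> int:
--     """Calculate nesting depth of a GraphQL query."""
--     def scan(s):
--         # (max running depth over all prefixes, incl. empty; total delta)
--         if len(s) == 0: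
--             return (0, 0)
--         if len(s) == 1:
--             if s == '{':
--                 return (1, 1)
--             if s == '}':
--                 return (0, -1)
--             return (0, 0)
--         mid = len(s) // 2
--         lm, lt = scan(s[:mid])
--         rm, rt = scan(s[mid:])
--         return (max(lm, lt + rm), lt + rt)
--     return scan(query)[0]
-- ===== Notes on version B (the rewrite author's own statement) =====
-- stated objective: alternative
-- what changed: B computes the depth by divide and conquer: it recursively splits the string in halves, returns the pair (max prefix depth, total brace delta) for each half and combines them with max(lm, lt+rm), instead of A's left-to-right scan with an inline running maximum.
import Mathlib
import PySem

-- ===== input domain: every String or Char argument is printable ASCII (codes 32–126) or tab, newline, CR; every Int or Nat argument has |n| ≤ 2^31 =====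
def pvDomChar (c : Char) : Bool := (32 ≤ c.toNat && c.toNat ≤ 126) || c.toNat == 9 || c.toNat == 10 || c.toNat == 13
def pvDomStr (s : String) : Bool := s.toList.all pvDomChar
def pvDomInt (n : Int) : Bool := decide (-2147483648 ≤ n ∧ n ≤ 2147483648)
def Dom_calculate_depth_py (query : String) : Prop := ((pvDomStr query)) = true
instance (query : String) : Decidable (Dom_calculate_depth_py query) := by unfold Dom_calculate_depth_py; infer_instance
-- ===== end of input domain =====

-- B computes the depth by divide and conquer on string halves (pair (max prefix depth, total delta)); alternative algorithm, same O(n) work.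


-- ===== PORT A =====
-- state (max_depth, current), branches in source order
def pvStepA (s : Int × Int) (c : Char) : Int × Int :=
  if c = '{' then (max s.1 (s.2 + 1), s.2 + 1)
  else if c = '}' then (s.1, s.2 - 1)
  else s

def calculate_depth_py (query : String) : Int :=
  (query.toList.foldl pvStepA (0, 0)).1

-- ===== PORT B =====
-- divide and conquer: scan returns (max prefix depth incl. empty prefix, total delta)
def pvScan : List Char → Int × Int
  | [] => (0, 0)
  | [c] => if c = '{' then (1, 1) else if c = '}' then (0, -1) else (0, 0)
  | a :: b :: t =>
    let l := a :: b :: t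
    let mid := l.length / 2
    let lp := pvScan (l.take mid)
    let rp := pvScan (l.drop mid)
    (max lp.1 (lp.2 + rp.1), lp.2 + rp.2)
  termination_by l => l.length
  decreasing_by all_goals simp_all [List.length_take, List.length_drop]; omega

def calculate_depth_py_alt (query : String) : Int :=
  (pvScan query.toList).1

-- ===== PRECONDITION & SPEC =====
def Spec_calculate_depth_py (query : String) (out : Int) : Prop := out = calculate_depth_py_alt query
instance (query : String) (out : Int) : Decidable (Spec_calculate_depth_py query out) := by unfold Spec_calculate_depth_py; infer_instance

-- ===== CLAIM (what is proved, stated in full; the proofs are below) =====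
def Claim_equal_calculate_depth_py : Prop := ∀ (query : String), Dom_calculate_depth_py query → Spec_calculate_depth_py query (calculate_depth_py query)

-- ===== LEMMAS AND PROOFS =====
-- reference semantics: mp = max running depth over prefixes (incl. empty), tot = sum of deltas
def pvMp : List Char → Int
  | [] => 0
  | c :: t => max 0 ((if c = '{' then 1 else if c = '}' then -1 else 0) + pvMp t)

def pvTot : List Char → Int
  | [] => 0
  | c :: t => (if c = '{' then 1 else if c = '}' then -1 else 0) + pvTot t

theorem pvMp_nonneg (l : List Char) : 0 ≤ pvMp l := by
  cases l <;> simp [pvMp]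

theorem pvMp_append (u v : List Char) :
    pvMp (u ++ v) = max (pvMp u) (pvTot u + pvMp v) := by
  induction u with
  | nil => simpa [pvMp, pvTot] using (max_eq_right (pvMp_nonneg v)).symm
  | cons c t ih =>
    simp only [List.cons_append, pvMp, pvTot, ih]
    omega

theorem pvTot_append (u v : List Char) : pvTot (u ++ v) = pvTot u + pvTot v := by
  induction u with
  | nil => simp [pvTot]
  | cons c t ih => simp [pvTot, ih]; omega

theorem pvScan_eq (l : List Char) : pvScan l = (pvMp l, pvTot l) := by
  induction l using pvScan.induct with
  | case1 => simp [pvScan, pvMp, pvTot]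
  | case2 => rw [pvScan]; norm_num [pvMp, pvTot]
  | case3 h => simp [pvScan, pvMp, pvTot, h]
  | case4 c h1 h2 => simp [pvScan, pvMp, pvTot, h1, h2]
  | case5 a b t l mid ihl ihr =>
    have h := List.take_append_drop ((a :: b :: t).length / 2) (a :: b :: t)
    rw [pvScan]
    have ihl' : pvScan (List.take ((a :: b :: t).length / 2) (a :: b :: t)) =
        (pvMp (List.take ((a :: b :: t).length / 2) (a :: b :: t)),
         pvTot (List.take ((a :: b :: t).length / 2) (a :: b :: t))) := ihl
    have ihr' : pvScan (List.drop ((a :: b :: t).length / 2) (a :: b :: t)) =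
        (pvMp (List.drop ((a :: b :: t).length / 2) (a :: b :: t)),
         pvTot (List.drop ((a :: b :: t).length / 2) (a :: b :: t))) := ihr
    simp only [ihl', ihr']
    conv_rhs => rw [← h]
    rw [pvMp_append, pvTot_append]

theorem pvFoldA (l : List Char) (m c : Int) (hcm : c ≤ m) :
    l.foldl pvStepA (m, c) = (max m (c + pvMp l), c + pvTot l) := by
  induction l generalizing m c with
  | nil => simp [pvMp, pvTot]; omega
  | cons ch t ih =>
    have hmt := pvMp_nonneg t
    rw [List.foldl_cons]
    by_cases h1 : ch = '{'
    · rw [show pvStepA (m, c) ch = (max m (c + 1), c + 1) from by simp [pvStepA, h1]]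
      rw [ih _ _ (le_max_right _ _)]
      refine Prod.ext ?_ ?_ <;> (simp [pvMp, pvTot, h1]; omega)
    · by_cases h2 : ch = '}'
      · rw [show pvStepA (m, c) ch = (m, c - 1) from by simp [pvStepA, h2]]
        rw [ih _ _ (by omega)]
        refine Prod.ext ?_ ?_ <;> (simp [pvMp, pvTot, h2]; omega)
      · rw [show pvStepA (m, c) ch = (m, c) from by simp [pvStepA, h1, h2]]
        rw [ih _ _ hcm]
        refine Prod.ext ?_ ?_ <;> simp [pvMp, pvTot, h1, h2] <;> omega

-- ===== VERDICT (by name: the statement is the Claim_ definition above) =====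
theorem calculate_depth_py_spec : Claim_equal_calculate_depth_py := by
  intro query _
  unfold Spec_calculate_depth_py calculate_depth_py calculate_depth_py_alt
  rw [pvFoldA _ 0 0 le_rfl, pvScan_eq]
  simpa using (max_eq_right (pvMp_nonneg query.toList)).symm
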